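-- pv_equiv track=rewrite | github.com/QuangPhung15/CompetitiveProgramming | codeforce/Python/800/Even Array.py | solve
-- ===== SOURCE A (Python) =====
-- def solve(n, nums):
-- 	odd, even = 0, 0
--
-- 	for i in range(n):
-- 		if (i % 2 != nums[i] % 2):
-- 			if (nums[i] % 2 == 0):
-- 				even += 1
-- 			else:
-- 				odd += 1
--
-- 	if (odd != even):
-- 		return -1
--
-- 	return odd
-- ===== SOURCE B (Python) =====
-- def solve(n, nums):
-- 	pre = nums[:max(n, 0)]
-- 	if sum(x % 2 for x in pre) != len(pre) // 2:
-- 		return -1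
-- 	return sum(x % 2 for i, x in enumerate(pre) if i % 2 == 0)
-- ===== Notes on version B (the rewrite author's own statement) =====
-- stated objective: alternative
-- what changed: B replaces A's indexed loop keeping two parallel mismatch tallies by a slice plus two comprehensions: it compares the total count of odd values in the prefix with len(prefix)//2 (the number of odd positions) to decide -1, then counts odd values at even positions; no even-mismatch tally is maintained.
import Mathlib
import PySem

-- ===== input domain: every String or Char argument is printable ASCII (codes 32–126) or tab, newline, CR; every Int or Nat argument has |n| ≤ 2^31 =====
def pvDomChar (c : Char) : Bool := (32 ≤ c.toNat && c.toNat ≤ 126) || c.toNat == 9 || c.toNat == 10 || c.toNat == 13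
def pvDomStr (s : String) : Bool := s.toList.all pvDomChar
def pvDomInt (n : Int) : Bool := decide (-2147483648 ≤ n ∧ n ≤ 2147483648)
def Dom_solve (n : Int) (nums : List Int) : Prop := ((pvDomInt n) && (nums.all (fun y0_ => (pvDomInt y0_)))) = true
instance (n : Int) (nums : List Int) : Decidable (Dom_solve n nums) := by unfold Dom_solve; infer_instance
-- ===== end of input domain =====

-- B decides -1 by comparing the total odd-value count of nums[:n] with n//2 instead of keeping A's two parallel mismatch tallies; same cost, different decomposition.

-- ===== PORT A =====
def solve (n : Int) (nums : List Int) : Int :=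
  let oe := (PySem.List.pyRange 0 n 1).foldl
    (fun (acc : Int × Int) i =>
      if PySem.Int.mod i 2 ≠ PySem.Int.mod (PySem.List.pyGetD nums i 0) 2 then
        if PySem.Int.mod (PySem.List.pyGetD nums i 0) 2 = 0 then (acc.1, acc.2 + 1)
        else (acc.1 + 1, acc.2)
      else acc) (0, 0)
  if oe.1 ≠ oe.2 then -1 else oe.1

-- ===== PORT B =====
def solve_alt (n : Int) (nums : List Int) : Int :=
  let pre := PySem.List.slice nums none (some (max n 0))
  if (pre.map (fun x => PySem.Int.mod x 2)).sum ≠ PySem.Int.floordiv (PySem.List.len pre) 2 then -1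
  else (((PySem.List.enumerate pre 0).filter
          (fun p => PySem.Int.mod p.1 2 == 0)).map
          (fun p => PySem.Int.mod p.2 2)).sum

-- ===== PRECONDITION & SPEC =====
-- Pre_ excludes only n > len(nums), where A raises IndexError.
def Pre_solve (n : Int) (nums : List Int) : Prop := n ≤ nums.length
instance (n : Int) (nums : List Int) : Decidable (Pre_solve n nums) := by unfold Pre_solve; infer_instance
def pvWitness_solve : Int × List Int := (2, [1, 0])
def Spec_solve (n : Int) (nums : List Int) (out : Int) : Prop := out = solve_alt n nums
instance (n : Int) (nums : List Int) (out : Int) : Decidable (Spec_solve n nums out) := by unfold Spec_solve; infer_instance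

-- ===== CLAIM (what is proved, stated in full; the proofs are below) =====
def Claim_equal_solve : Prop := ∀ (n : Int) (nums : List Int), Dom_solve n nums → Pre_solve n nums → Spec_solve n nums (solve n nums)

-- ===== LEMMAS AND PROOFS =====

-- count, over positions starting at index s, of odd values at even positions
def pvX : List Int → Int → Int
  | [], _ => 0
  | x :: t, s => (if s % 2 = 0 ∧ x % 2 = 1 then 1 else 0) + pvX t (s + 1)

-- count, over positions starting at index s, of even values at odd positions
def pvY : List Int → Int → Int
  | [], _ => 0
  | x :: t, s => (if s % 2 = 1 ∧ x % 2 = 0 then 1 else 0) + pvY t (s + 1)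

theorem pvX_period (l : List Int) : ∀ s : Int, pvX l (s + 2) = pvX l s := by
  induction l with
  | nil => intro s; rfl
  | cons x t ih =>
    intro s
    have h2 : (s + 2) % 2 = s % 2 := by omega
    simp only [pvX, h2]
    have e : s + 2 + 1 = (s + 1) + 2 := by ring
    rw [e, ih]

theorem pv_foldA (l : List Int) : ∀ (s a b : Int),
    (PySem.List.enumerate l s).foldl
      (fun (acc : Int × Int) p =>
        if PySem.Int.mod p.1 2 ≠ PySem.Int.mod p.2 2 then
          if PySem.Int.mod p.2 2 = 0 then (acc.1, acc.2 + 1)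
          else (acc.1 + 1, acc.2)
        else acc) (a, b) = (a + pvX l s, b + pvY l s) := by
  induction l with
  | nil => intro s a b; simp [PySem.List.enumerate_nil, pvX, pvY]
  | cons x t ih =>
    intro s a b
    rw [PySem.List.enumerate_cons]
    have hs := PySem.Int.mod_eq_emod_of_pos (a := s) (b := 2) (by omega)
    have hx := PySem.Int.mod_eq_emod_of_pos (a := x) (b := 2) (by omega)
    simp only [List.foldl_cons, hs, hx, pvX, pvY]
    by_cases h1 : s % 2 = x % 2
    · rw [if_neg (by omega), ih, if_neg (show ¬ (s % 2 = 0 ∧ x % 2 = 1) by omega),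
         if_neg (show ¬ (s % 2 = 1 ∧ x % 2 = 0) by omega)]
      rw [Prod.mk.injEq]; constructor <;> ring
    · rw [if_pos (by omega)]
      by_cases h2 : x % 2 = 0
      · rw [if_pos h2, ih, if_neg (show ¬ (s % 2 = 0 ∧ x % 2 = 1) by omega),
           if_pos (show s % 2 = 1 ∧ x % 2 = 0 by omega)]
        rw [Prod.mk.injEq]; constructor <;> ring
      · rw [if_neg h2, ih, if_pos (show s % 2 = 0 ∧ x % 2 = 1 by omega),
           if_neg (show ¬ (s % 2 = 1 ∧ x % 2 = 0) by omega)]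
        rw [Prod.mk.injEq]; constructor <;> ring

theorem pv_countB (l : List Int) : ∀ s : Int,
    (((PySem.List.enumerate l s).filter (fun p => PySem.Int.mod p.1 2 == 0)).map
      (fun p => PySem.Int.mod p.2 2)).sum = pvX l s := by
  induction l with
  | nil => intro s; simp [PySem.List.enumerate_nil, pvX]
  | cons x t ih =>
    intro s
    rw [PySem.List.enumerate_cons]
    have hs := PySem.Int.mod_eq_emod_of_pos (a := s) (b := 2) (by omega)
    have hx := PySem.Int.mod_eq_emod_of_pos (a := x) (b := 2) (by omega)
    simp only [List.filter_cons, pvX, hs]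
    by_cases hk : s % 2 = 0
    · rw [if_pos (by simp [hk])]
      simp only [List.map_cons, List.sum_cons, hx, ih]
      generalize pvX t (s + 1) = P
      split_ifs <;> omega
    · rw [if_neg (by simp [hk]), ih, if_neg (by omega)]
      ring

theorem pv_oddTotal (l : List Int) : ∀ s : Int,
    (l.map (fun x => PySem.Int.mod x 2)).sum = pvX l s + pvX l (s + 1) := by
  induction l with
  | nil => intro s; simp [pvX]
  | cons x t ih =>
    intro s
    have hx := PySem.Int.mod_eq_emod_of_pos (a := x) (b := 2) (by omega)
    simp only [List.map_cons, List.sum_cons, hx, pvX, ih (s + 1)]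
    have e : s + 1 + 1 = s + 2 := by ring
    rw [e, pvX_period]
    generalize pvX t (s + 1) = P
    generalize pvX t s = Q
    split_ifs <;> omega

theorem pv_halfIdx (l : List Int) : ∀ s : Int,
    pvY l s + pvX l (s + 1) = ((l.length : Int) + s % 2) / 2 := by
  induction l with
  | nil => intro s; simp [pvX, pvY]; omega
  | cons x t ih =>
    intro s
    simp only [pvX, pvY, List.length_cons]
    have hIH := ih (s + 1)
    generalize pvY t (s + 1) = P at hIH ⊢
    generalize pvX t (s + 1 + 1) = Q at hIH ⊢
    push_cast
    split_ifs <;> omega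

-- ===== VERDICT (by name: the statement is the Claim_ definition above) =====
theorem solve_spec : Claim_equal_solve := by
  intro n nums _hdom hpre
  have hnlen : n ≤ (nums.length : Int) := hpre
  unfold Spec_solve solve solve_alt
  by_cases hn0 : 0 ≤ n
  · have hmax : max n 0 = n := by omega
    rw [hmax]
    set pre := PySem.List.slice nums none (some n) with hpre_def
    have hpre_take : pre = nums.take n.toNat := PySem.List.slice_to nums hn0
    have hlenN : pre.length = n.toNat := by
      rw [hpre_take, List.length_take]; omega
    have hlen : (pre.length : Int) = n := by rw [hlenN]; omega
    -- A's fold over range(n) is the fold over enumerate(pre)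
    have hget : ∀ i ∈ PySem.List.pyRange 0 n 1,
        PySem.List.pyGetD nums i 0 = PySem.List.pyGetD pre i 0 := by
      intro i hi
      rw [PySem.List.mem_pyRange_one] at hi
      have hi1 : i < (nums.length : Int) := by omega
      have hi2 : i < ((nums.take n.toNat).length : Int) := by rw [List.length_take]; omega
      rw [hpre_take, PySem.List.pyGetD_eq_getElem nums (0:Int) hi.1 hi1,
          PySem.List.pyGetD_eq_getElem (nums.take n.toNat) (0:Int) hi.1 hi2]
      exact (List.getElem_take).symm
    have henum : PySem.List.enumerate pre 0
        = (PySem.List.pyRange 0 (PySem.List.len pre) 1).map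
            (fun j => (j, PySem.List.pyGetD pre j 0)) :=
      PySem.List.enumerate_eq_map_pyRange pre (0:Int)
    have hlen' : PySem.List.len pre = n := by rw [PySem.List.len_eq]; exact hlen
    rw [hlen'] at henum
    have hfold :
        (PySem.List.pyRange 0 n 1).foldl
          (fun (acc : Int × Int) i =>
            if PySem.Int.mod i 2 ≠ PySem.Int.mod (PySem.List.pyGetD nums i 0) 2 then
              if PySem.Int.mod (PySem.List.pyGetD nums i 0) 2 = 0 then (acc.1, acc.2 + 1)
              else (acc.1 + 1, acc.2)
            else acc) ((0 : Int), (0 : Int))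
        = ((0 : Int) + pvX pre 0, (0 : Int) + pvY pre 0) := by
      rw [← pv_foldA pre 0 0 0, henum, List.foldl_map]
      exact (PySem.List.foldl_congr_mem _ _ _ _ (by
        intro acc i hi
        rw [hget i hi])).symm
    rw [hfold]
    simp only [zero_add]
    -- B's branch condition equals A's
    have hZ := pv_oddTotal pre 0
    have hH := pv_halfIdx pre 0
    have hC := pv_countB pre 0
    have hfd : PySem.Int.floordiv (PySem.List.len pre) 2 = n / 2 := by
      rw [hlen', PySem.Int.floordiv_eq_ediv_of_pos (a := n) (b := 2) (by omega)]
    rw [hZ, hC, hfd]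
    have hhalf : pvY pre 0 + pvX pre (0 + 1) = n / 2 := by
      rw [hH, ← hlen]; norm_num
    by_cases hAB : pvX pre 0 = pvY pre 0
    · rw [if_neg (by omega), if_neg (by omega)]
    · rw [if_pos (by omega), if_pos (by omega)]
  · -- n < 0: A's range is empty and B's clamped prefix is empty; both return 0
    have hmax : max n 0 = 0 := by omega
    rw [hmax, PySem.List.pyRange_one_eq_nil (by omega),
        PySem.List.slice_to nums (by omega)]
    simp [PySem.List.enumerate_nil, PySem.Int.floordiv, PySem.List.len]
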